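-- pv_equiv track=rewrite | github.com/baberabb/bergson | examples/find_induction_heads.py | label_repeating_bigrams
-- ===== SOURCE A (Python) =====
-- def label_repeating_bigrams(input_ids, pad_token_id):
--     """
--     Label all positions where a bigram repeats for induction head evaluation.
--
--     For sequence [A][B]...[A][B], when we see the second [A], we should predict [B].
--     This function finds all such cases and creates labels accordingly.
--
--     Args:
--         input_ids: List of token IDs
--         pad_token_id: Token ID to ignore (padding)
--
--     Returns:
--         labels: List where labels[i] = token to predict at position i, or -100 if not labeled
--     """
--     labels = [-100] * len(input_ids)
--
--     # Find all bigrams and their positions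
--     bigrams = {}  # (tok_i, tok_i+1) -> [list of positions where bigram starts]
--     for i in range(len(input_ids) - 1):
--         # Skip padding tokens
--         if input_ids[i] == pad_token_id or input_ids[i + 1] == pad_token_id:
--             continue
--
--         bigram = (input_ids[i], input_ids[i + 1])
--         if bigram not in bigrams:
--             bigrams[bigram] = []
--         bigrams[bigram].append(i)
--
--     # For any bigram that appears multiple times, label the repetitions
--     for bigram, positions in bigrams.items():
--         if len(positions) >= 2:  # Bigram repeats!
--             # Label all repetitions (skip first occurrence - that's what we learn from)
--             for pos in positions[1:]:
--                 # At position pos, we see first element of bigram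
--                 # We should predict second element at pos+1
--                 tok1, tok2 = bigram
--                 if pos + 1 < len(input_ids):
--                     labels[pos + 1] = tok2
--
--     return labels
-- ===== SOURCE B (Python) =====
-- def label_repeating_bigrams(input_ids, pad_token_id):
--     """Single streaming pass: a set of bigrams seen so far replaces the
--     build-full-index-then-walk-entries structure of the original."""
--     labels = [-100] * len(input_ids)
--     seen = set()
--     for i in range(len(input_ids) - 1):
--         a, b = input_ids[i], input_ids[i + 1]
--         if a == pad_token_id or b == pad_token_id:
--             continue
--         if (a, b) in seen:
--             labels[i + 1] = b
--         else:
--             seen.add((a, b))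
--     return labels
-- ===== Notes on version B (the rewrite author's own statement) =====
-- stated objective: simpler
-- what changed: Replaced the two-phase build-a-bigram->positions-index-then-walk-its-entries algorithm by a single streaming pass that keeps only a set of bigrams already seen and labels a position the moment its bigram repeats.
import Mathlib
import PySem

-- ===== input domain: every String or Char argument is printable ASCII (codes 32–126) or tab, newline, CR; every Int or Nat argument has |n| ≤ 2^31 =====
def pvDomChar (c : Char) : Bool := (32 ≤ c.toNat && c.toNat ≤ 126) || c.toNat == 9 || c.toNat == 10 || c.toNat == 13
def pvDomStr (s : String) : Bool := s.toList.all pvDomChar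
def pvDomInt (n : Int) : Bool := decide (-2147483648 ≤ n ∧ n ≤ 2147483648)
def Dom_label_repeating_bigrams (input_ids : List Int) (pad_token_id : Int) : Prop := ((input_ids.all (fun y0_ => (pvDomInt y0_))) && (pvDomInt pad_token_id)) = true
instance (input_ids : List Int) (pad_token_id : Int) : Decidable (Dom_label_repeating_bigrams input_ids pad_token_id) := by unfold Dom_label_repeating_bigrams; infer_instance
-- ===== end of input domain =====

-- B replaces A's two-phase bigram->positions index with a single streaming pass over a
-- seen-set (objective: simpler); return values proved equal on all inputs.

-- ===== PORT A =====
-- Indices i, i+1 and pos+1 are always in range (i < len-1, 0 ≤ pos < len-1), so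
-- pyGetD / List.set with .toNat are exact here.
def label_repeating_bigrams (input_ids : List Int) (pad_token_id : Int) : List Int :=
  let n := input_ids.length
  let labels : List Int := List.replicate n (-100)
  let bigrams : PySem.Dict (Int × Int) (List Int) :=
    (PySem.List.pyRange 0 ((n : Int) - 1) 1).foldl
      (fun d i =>
        if PySem.List.pyGetD input_ids i 0 == pad_token_id
            || PySem.List.pyGetD input_ids (i + 1) 0 == pad_token_id then d
        else
          let g := (PySem.List.pyGetD input_ids i 0, PySem.List.pyGetD input_ids (i + 1) 0)
          let d' := if d.contains g then d else d.insert g ([] : List Int)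
          d'.insert g (d'.getD g [] ++ [i]))
      PySem.Dict.empty
  bigrams.items.foldl
    (fun labels e =>
      if 2 ≤ e.2.length then
        (PySem.List.slice e.2 (some 1) none).foldl
          (fun lab pos => if pos + 1 < (n : Int) then lab.set (pos + 1).toNat e.1.2 else lab)
          labels
      else labels)
    labels

-- ===== PORT B =====
def label_repeating_bigrams_alt (input_ids : List Int) (pad_token_id : Int) : List Int :=
  let n := input_ids.length
  let st :=
    (PySem.List.pyRange 0 ((n : Int) - 1) 1).foldl
      (fun (st : List Int × PySem.Set (Int × Int)) i =>
        let a := PySem.List.pyGetD input_ids i 0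
        let b := PySem.List.pyGetD input_ids (i + 1) 0
        if a == pad_token_id || b == pad_token_id then st
        else if PySem.Set.contains st.2 (a, b) then (st.1.set (i + 1).toNat b, st.2)
        else (st.1, PySem.Set.add st.2 (a, b)))
      (List.replicate n (-100), PySem.Set.empty)
  st.1

-- ===== PRECONDITION & SPEC =====
def Spec_label_repeating_bigrams (input_ids : List Int) (pad_token_id : Int) (out : List Int) : Prop := out = label_repeating_bigrams_alt input_ids pad_token_id
instance (input_ids : List Int) (pad_token_id : Int) (out : List Int) : Decidable (Spec_label_repeating_bigrams input_ids pad_token_id out) := by unfold Spec_label_repeating_bigrams; infer_instance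

-- ===== CLAIM (what is proved, stated in full; the proofs are below) =====
def Claim_equal_label_repeating_bigrams : Prop := ∀ (input_ids : List Int) (pad_token_id : Int), Dom_label_repeating_bigrams input_ids pad_token_id → Spec_label_repeating_bigrams input_ids pad_token_id (label_repeating_bigrams input_ids pad_token_id)

-- ===== LEMMAS AND PROOFS =====
-- Shared vocabulary: pvOcc = "position k starts a non-padding bigram",
-- pvBg = the bigram at k, pvPrev = "the bigram at i occurred earlier",
-- pvTarget = the labelling both programs compute.
def pvOcc (ids : List Int) (pad : Int) (k : Nat) : Bool :=
  (ids.getD k 0 != pad) && (ids.getD (k + 1) 0 != pad)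

def pvBg (ids : List Int) (k : Nat) : Int × Int :=
  (ids.getD k 0, ids.getD (k + 1) 0)

def pvPrev (ids : List Int) (pad : Int) (i : Nat) : Bool :=
  (List.range i).any (fun k => pvOcc ids pad k && (pvBg ids k == pvBg ids i))

def pvRep (ids : List Int) (pad : Int) (m j : Nat) : Bool :=
  match j with
  | 0 => false
  | i + 1 => decide (i < m) && pvOcc ids pad i && pvPrev ids pad i

def pvTarget (ids : List Int) (pad : Int) (m : Nat) : List Int :=
  (List.range ids.length).map (fun j => if pvRep ids pad m j then ids.getD j 0 else -100)

def pvSeen (ids : List Int) (pad : Int) (m : Nat) : PySem.Set (Int × Int) :=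
  PySem.Set.ofList (((List.range m).filter (pvOcc ids pad)).map (pvBg ids))

lemma pvTarget_zero (ids : List Int) (pad : Int) :
    pvTarget ids pad 0 = List.replicate ids.length (-100) := by
  apply List.ext_getElem
  · simp [pvTarget]
  intro j h1 h2
  simp only [pvTarget, List.getElem_map, List.getElem_range, List.getElem_replicate]
  have : pvRep ids pad 0 j = false := by
    match j with
    | 0 => rfl
    | i + 1 => simp [pvRep]
  simp [this]

lemma mem_pvSeen (ids : List Int) (pad : Int) (m : Nat) (g : Int × Int) :
    g ∈ pvSeen ids pad m ↔ ∃ k, k < m ∧ pvOcc ids pad k ∧ pvBg ids k = g := by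
  simp only [pvSeen, PySem.Set.mem_ofList, List.mem_map, List.mem_filter, List.mem_range]
  constructor
  · rintro ⟨k, ⟨hk, ho⟩, hg⟩; exact ⟨k, hk, ho, hg⟩
  · rintro ⟨k, hk, ho, hg⟩; exact ⟨k, ⟨hk, ho⟩, hg⟩

lemma pvRep_succ_ne (ids : List Int) (pad : Int) (m j : Nat) (h : j ≠ m + 1) :
    pvRep ids pad (m + 1) j = pvRep ids pad m j := by
  match j with
  | 0 => rfl
  | i + 1 =>
    simp only [pvRep]
    have : decide (i < m + 1) = decide (i < m) := decide_eq_decide.mpr (by omega)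
    rw [this]

lemma pvTarget_set (ids : List Int) (pad : Int) (m : Nat)
    (hocc : pvOcc ids pad m = true) (hprev : pvPrev ids pad m = true) :
    (pvTarget ids pad m).set (m + 1) (ids.getD (m + 1) 0) = pvTarget ids pad (m + 1) := by
  apply List.ext_getElem
  · simp [pvTarget]
  intro j h1 h2
  simp only [pvTarget, List.getElem_set, List.getElem_map, List.getElem_range]
  have hlen : j < ids.length := by simpa [pvTarget] using h2
  by_cases hjm : m + 1 = j
  · subst hjm
    have : pvRep ids pad (m + 1) (m + 1) = true := by
      simp [pvRep, hocc, hprev]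
    simp [this]
  · rw [if_neg hjm, pvRep_succ_ne ids pad m j (by omega)]

lemma pvTarget_succ_no (ids : List Int) (pad : Int) (m : Nat)
    (h : (pvOcc ids pad m && pvPrev ids pad m) = false) :
    pvTarget ids pad (m + 1) = pvTarget ids pad m := by
  unfold pvTarget
  apply List.map_congr_left
  intro j hj
  match j with
  | 0 => rfl
  | i + 1 =>
    simp only [pvRep]
    by_cases hi : i = m
    · subst hi; simp_all
    · have : decide (i < m + 1) = decide (i < m) := decide_eq_decide.mpr (by omega)
      simp only [this]
      rfl

lemma pvSeen_succ_occ (ids : List Int) (pad : Int) (m : Nat) (h : pvOcc ids pad m = true) :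
    pvSeen ids pad (m + 1) = PySem.Set.add (pvSeen ids pad m) (pvBg ids m) := by
  unfold pvSeen
  rw [List.range_succ, List.filter_append, List.map_append]
  simp [h, PySem.Set.ofList_append_singleton]

lemma pvSeen_succ_no (ids : List Int) (pad : Int) (m : Nat) (h : pvOcc ids pad m = false) :
    pvSeen ids pad (m + 1) = pvSeen ids pad m := by
  unfold pvSeen
  rw [List.range_succ, List.filter_append]
  simp [h]

-- ===== B side =====
lemma B_loop (ids : List Int) (pad : Int) (m : Nat) (hm : m ≤ ids.length - 1) :
    ((List.range m).map (fun k : Nat => (k : Int))).foldl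
      (fun (st : List Int × PySem.Set (Int × Int)) i =>
        let a := PySem.List.pyGetD ids i 0
        let b := PySem.List.pyGetD ids (i + 1) 0
        if a == pad || b == pad then st
        else if PySem.Set.contains st.2 (a, b) then (st.1.set (i + 1).toNat b, st.2)
        else (st.1, PySem.Set.add st.2 (a, b)))
      (List.replicate ids.length (-100), PySem.Set.empty)
      = (pvTarget ids pad m, pvSeen ids pad m) := by
  induction m with
  | zero =>
    simp [pvTarget_zero, pvSeen, PySem.Set.empty]
  | succ m ih =>
    have hm' : m ≤ ids.length - 1 := by omega
    have hsplit : (List.range (m + 1)).map (fun k : Nat => (k : Int))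
        = (List.range m).map (fun k : Nat => (k : Int)) ++ [((m : Nat) : Int)] := by
      rw [List.range_succ]; simp
    rw [hsplit, List.foldl_append, ih hm']
    simp only [List.foldl_cons, List.foldl_nil]
    have ha : PySem.List.pyGetD ids ((m : Nat) : Int) 0 = ids.getD m 0 :=
      PySem.List.pyGetD_natCast ids m 0
    have hb : PySem.List.pyGetD ids (((m : Nat) : Int) + 1) 0 = ids.getD (m + 1) 0 := by
      have : ((m : Nat) : Int) + 1 = ((m + 1 : Nat) : Int) := by push_cast; ring
      rw [this]; exact PySem.List.pyGetD_natCast ids (m + 1) 0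
    simp only [ha, hb]
    by_cases hpad : (ids.getD m 0 == pad || ids.getD (m + 1) 0 == pad) = true
    · rw [if_pos hpad]
      have hocc : pvOcc ids pad m = false := by
        simp only [Bool.or_eq_true, beq_iff_eq] at hpad
        unfold pvOcc
        rcases hpad with h | h
        · rw [h]; simp
        · rw [h]; simp
      rw [pvTarget_succ_no ids pad m (by simp [hocc]), pvSeen_succ_no ids pad m hocc]
    · rw [if_neg hpad]
      have hocc : pvOcc ids pad m = true := by
        simp only [Bool.or_eq_true, beq_iff_eq, not_or] at hpad
        simp only [pvOcc, bne_iff_ne, Bool.and_eq_true, ne_eq]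
        exact hpad
      by_cases hmem : (ids.getD m 0, ids.getD (m + 1) 0) ∈ pvSeen ids pad m
      · have hc : PySem.Set.contains (pvSeen ids pad m) (ids.getD m 0, ids.getD (m + 1) 0) = true :=
          (PySem.Set.contains_iff _ _).mpr hmem
        rw [if_pos hc]
        have hprev : pvPrev ids pad m = true := by
          rcases (mem_pvSeen ids pad m _).mp hmem with ⟨k, hk, ho, hg⟩
          simp only [pvPrev, List.any_eq_true]
          exact ⟨k, List.mem_range.mpr hk, by simp [ho, pvBg] at hg ⊢; simp [hg]⟩
        have htn : (((m : Nat) : Int) + 1).toNat = m + 1 := by omega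
        have hset : pvSeen ids pad (m + 1) = pvSeen ids pad m := by
          rw [pvSeen_succ_occ ids pad m hocc]
          exact PySem.Set.add_of_mem (by simpa [pvBg] using hmem)
        rw [hset]
        simp only [htn]
        rw [pvTarget_set ids pad m hocc hprev]
      · have hc : PySem.Set.contains (pvSeen ids pad m) (ids.getD m 0, ids.getD (m + 1) 0) = false := by
          rw [← Bool.not_eq_true]
          intro hcon
          exact hmem ((PySem.Set.contains_iff _ _).mp hcon)
        rw [hc]
        simp only [Bool.false_eq_true, if_false]
        have hprev : pvPrev ids pad m = false := by
          rw [← Bool.not_eq_true]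
          intro hp
          apply hmem
          simp only [pvPrev, List.any_eq_true] at hp
          rcases hp with ⟨k, hk, hkp⟩
          simp only [Bool.and_eq_true, beq_iff_eq] at hkp
          exact (mem_pvSeen ids pad m _).mpr ⟨k, List.mem_range.mp hk, hkp.1, by simpa [pvBg] using hkp.2⟩
        rw [pvTarget_succ_no ids pad m (by simp [hprev]), pvSeen_succ_occ ids pad m hocc]
        simp [pvBg]

lemma B_loop_full (ids : List Int) (pad : Int) :
    (PySem.List.pyRange 0 ((ids.length : Int) - 1) 1).foldl
      (fun (st : List Int × PySem.Set (Int × Int)) i =>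
        let a := PySem.List.pyGetD ids i 0
        let b := PySem.List.pyGetD ids (i + 1) 0
        if a == pad || b == pad then st
        else if PySem.Set.contains st.2 (a, b) then (st.1.set (i + 1).toNat b, st.2)
        else (st.1, PySem.Set.add st.2 (a, b)))
      (List.replicate ids.length (-100), PySem.Set.empty)
      = (pvTarget ids pad (ids.length - 1), pvSeen ids pad (ids.length - 1)) := by
  rcases ids with _ | ⟨x, xs⟩
  · rw [PySem.List.pyRange_one_eq_nil (by norm_num)]
    simp [pvTarget, pvSeen, PySem.Set.empty, PySem.Set.ofList]
  · have hn : ((((x :: xs).length : Nat) : Int) - 1) = (((x :: xs).length - 1 : Nat) : Int) := by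
      simp [List.length_cons]
    rw [hn, PySem.List.pyRange_zero_natCast]
    exact B_loop (x :: xs) pad ((x :: xs).length - 1) (le_refl _)

lemma B_eq_target (ids : List Int) (pad : Int) :
    label_repeating_bigrams_alt ids pad = pvTarget ids pad (ids.length - 1) := by
  unfold label_repeating_bigrams_alt
  exact congrArg Prod.fst (B_loop_full ids pad)

-- ===== A side =====
def pvPairs (ids : List Int) (pad : Int) (m : Nat) : List ((Int × Int) × Int) :=
  (List.range m).filterMap
    (fun k => if pvOcc ids pad k then some (pvBg ids k, (k : Int)) else none)

def pvPosL (ids : List Int) (pad : Int) (g : Int × Int) : List Nat :=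
  (List.range (ids.length - 1)).filter (fun k => pvOcc ids pad k && (pvBg ids k == g))

def pvDictA (ids : List Int) (pad : Int) : PySem.Dict (Int × Int) (List Int) :=
  (pvPairs ids pad (ids.length - 1)).foldl
    (fun d p => d.modify p.1 [] (fun x => x ++ [p.2])) PySem.Dict.empty

lemma A_phase1 (ids : List Int) (pad : Int) (m : Nat) (d : PySem.Dict (Int × Int) (List Int)) :
    ((List.range m).map (fun k : Nat => (k : Int))).foldl
      (fun d i =>
        if PySem.List.pyGetD ids i 0 == pad || PySem.List.pyGetD ids (i + 1) 0 == pad then d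
        else
          let g := (PySem.List.pyGetD ids i 0, PySem.List.pyGetD ids (i + 1) 0)
          let d' := if d.contains g then d else d.insert g ([] : List Int)
          d'.insert g (d'.getD g [] ++ [i])) d
      = (pvPairs ids pad m).foldl (fun d p => d.modify p.1 [] (fun x => x ++ [p.2])) d := by
  induction m with
  | zero => rfl
  | succ m ih =>
    have hsplit : (List.range (m + 1)).map (fun k : Nat => (k : Int))
        = (List.range m).map (fun k : Nat => (k : Int)) ++ [((m : Nat) : Int)] := by
      rw [List.range_succ]; simp
    rw [hsplit, List.foldl_append, ih]
    have hp : pvPairs ids pad (m + 1)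
        = pvPairs ids pad m
          ++ (if pvOcc ids pad m then [(pvBg ids m, ((m : Nat) : Int))] else []) := by
      unfold pvPairs
      rw [List.range_succ, List.filterMap_append]
      by_cases h : pvOcc ids pad m = true <;> simp [h]
    rw [hp, List.foldl_append]
    simp only [List.foldl_cons, List.foldl_nil]
    have ha : PySem.List.pyGetD ids ((m : Nat) : Int) 0 = ids.getD m 0 :=
      PySem.List.pyGetD_natCast ids m 0
    have hb : PySem.List.pyGetD ids (((m : Nat) : Int) + 1) 0 = ids.getD (m + 1) 0 := by
      have : ((m : Nat) : Int) + 1 = ((m + 1 : Nat) : Int) := by push_cast; ring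
      rw [this]; exact PySem.List.pyGetD_natCast ids (m + 1) 0
    simp only [ha, hb]
    set D := (pvPairs ids pad m).foldl (fun d p => d.modify p.1 [] (fun x => x ++ [p.2])) d with hD
    by_cases hpad : (ids.getD m 0 == pad || ids.getD (m + 1) 0 == pad) = true
    · rw [if_pos hpad]
      have hocc : pvOcc ids pad m = false := by
        simp only [Bool.or_eq_true, beq_iff_eq] at hpad
        unfold pvOcc
        rcases hpad with h | h
        · rw [h]; simp
        · rw [h]; simp
      simp [hocc]
    · rw [if_neg hpad]
      have hocc : pvOcc ids pad m = true := by
        simp only [Bool.or_eq_true, beq_iff_eq, not_or] at hpad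
        simp only [pvOcc, bne_iff_ne, Bool.and_eq_true, ne_eq]
        exact hpad
      rw [hocc]
      simp only [if_true, List.foldl_cons, List.foldl_nil]
      show (let d' := if D.contains (pvBg ids m) then D else D.insert (pvBg ids m) ([] : List Int);
            d'.insert (pvBg ids m) (d'.getD (pvBg ids m) [] ++ [((m : Nat) : Int)]))
          = D.modify (pvBg ids m) [] (fun x => x ++ [((m : Nat) : Int)])
      by_cases hc : D.contains (pvBg ids m) = true
      · simp only [hc, if_true]
        rfl
      · simp only [hc, Bool.false_eq_true, if_false]
        rw [PySem.Dict.insert_insert_self, PySem.Dict.getD_insert_self]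
        have : D.modify (pvBg ids m) [] (fun x => x ++ [((m : Nat) : Int)])
            = D.insert (pvBg ids m) (D.getD (pvBg ids m) [] ++ [((m : Nat) : Int)]) := rfl
        rw [this, PySem.Dict.getD_of_not_contains D [] (by simpa using hc)]

lemma A_getD (ids : List Int) (pad : Int) (g : Int × Int) :
    (pvDictA ids pad).getD g [] = (pvPosL ids pad g).map (fun k : Nat => (k : Int)) := by
  unfold pvDictA
  rw [PySem.Dict.getD_foldl_modify_append]
  rw [PySem.Dict.getD_empty]
  rw [List.nil_append]
  unfold pvPairs pvPosL
  generalize List.range (ids.length - 1) = L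
  induction L with
  | nil => rfl
  | cons k L ih =>
    simp only [List.filterMap_cons, List.filter_cons]
    by_cases ho : pvOcc ids pad k = true
    · by_cases hg : pvBg ids k = g
      · have hbg : (pvBg ids k == g) = true := by simpa using hg
        simp [ho, hbg, ih]
      · have hbg : (pvBg ids k == g) = false := by simpa using hg
        simp [ho, hbg, ih]
    · have ho' : pvOcc ids pad k = false := by simpa using ho
      simp [ho', ih]

lemma A_nodup_keys (ids : List Int) (pad : Int) : (pvDictA ids pad).keys.Nodup := by
  unfold pvDictA
  exact PySem.Dict.nodup_keys_foldl_modify_key (pvPairs ids pad (ids.length - 1))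
    Prod.fst [] (fun _ p => (fun x => x ++ [p.2])) PySem.Dict.empty
    (by simp)

lemma A_mem_keys (ids : List Int) (pad : Int) (g : Int × Int) :
    g ∈ (pvDictA ids pad).keys ↔ ∃ k, k < ids.length - 1 ∧ pvOcc ids pad k = true ∧ pvBg ids k = g := by
  unfold pvDictA
  rw [PySem.Dict.keys_foldl_modify_key (pvPairs ids pad (ids.length - 1))
    Prod.fst [] (fun _ p => (fun x => x ++ [p.2])) PySem.Dict.empty]
  have he : (PySem.Dict.empty : PySem.Dict (Int × Int) (List Int)).keys = ([] : List (Int × Int)) := rfl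
  rw [he, PySem.Set.update_nil_left, PySem.Set.mem_ofList]
  unfold pvPairs
  simp only [List.mem_map, List.mem_filterMap, List.mem_range]
  constructor
  · rintro ⟨p, ⟨k, hk, hp⟩, rfl⟩
    by_cases ho : pvOcc ids pad k = true
    · rw [if_pos ho] at hp
      cases hp
      exact ⟨k, hk, ho, rfl⟩
    · rw [if_neg ho] at hp
      cases hp
  · rintro ⟨k, hk, ho, rfl⟩
    exact ⟨(pvBg ids k, (k : Int)), ⟨k, hk, by rw [if_pos ho]⟩, rfl⟩

lemma tail_filter_range (Q : Nat → Bool) (m x : Nat) :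
    x ∈ ((List.range m).filter Q).tail ↔ x < m ∧ Q x = true ∧ ∃ y, y < x ∧ Q y = true := by
  induction m with
  | zero => simp
  | succ m ih =>
    rw [List.range_succ, List.filter_append]
    by_cases hne : (List.range m).filter Q = []
    · have hall : ∀ y, y < m → ¬ Q y = true := by
        intro y hy hQ
        have : y ∈ (List.range m).filter Q := List.mem_filter.mpr ⟨List.mem_range.mpr hy, hQ⟩
        simp [hne] at this
      rw [hne, List.nil_append]
      constructor
      · intro hx
        by_cases hQm : Q m = true
        · simp [hQm] at hx
        · simp [hQm] at hx
      · rintro ⟨hx, hQx, y, hy, hQy⟩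
        exfalso
        exact hall y (by omega) hQy
    · rw [List.tail_append_of_ne_nil hne, List.mem_append, ih]
      obtain ⟨z, hz⟩ := List.exists_mem_of_ne_nil _ hne
      have hzm : z < m ∧ Q z = true := by
        have := List.mem_filter.mp hz
        exact ⟨List.mem_range.mp this.1, this.2⟩
      constructor
      · rintro (⟨h1, h2, h3⟩ | hx)
        · exact ⟨by omega, h2, h3⟩
        · by_cases hQm : Q m = true
          · simp [hQm] at hx
            subst hx
            exact ⟨by omega, hQm, z, by omega, hzm.2⟩
          · simp [hQm] at hx
      · rintro ⟨hx, hQx, y, hy, hQy⟩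
        by_cases hxm : x = m
        · subst hxm
          right
          simp [hQx]
        · left
          exact ⟨by omega, hQx, y, hy, hQy⟩

lemma W1_len (N : Int) (w : Int) (ps : List Int) (init : List Int) :
    (ps.foldl (fun lab pos => if pos + 1 < N then lab.set (pos + 1).toNat w else lab) init).length
      = init.length := by
  induction ps generalizing init with
  | nil => rfl
  | cons p ps ih =>
    simp only [List.foldl_cons]
    rw [ih]
    by_cases h : p + 1 < N
    · simp [h, List.length_set]
    · simp [h]

lemma W2_len (N : Int) (entries : List ((Int × Int) × List Int)) (init : List Int) :
    (entries.foldl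
      (fun labels e =>
        if 2 ≤ e.2.length then
          (PySem.List.slice e.2 (some 1) none).foldl
            (fun lab pos => if pos + 1 < N then lab.set (pos + 1).toNat e.1.2 else lab) labels
        else labels) init).length = init.length := by
  induction entries generalizing init with
  | nil => rfl
  | cons e es ih =>
    simp only [List.foldl_cons]
    rw [ih]
    by_cases h : 2 ≤ e.2.length
    · simp only [h, if_true]
      rw [W1_len]
    · simp [h]

lemma W1 (N : Int) (w : Int) (ps : List Int) (j : Nat) :
    ∀ (init : List Int), j < init.length →
    (ps.foldl (fun lab pos => if pos + 1 < N then lab.set (pos + 1).toNat w else lab) init)[j]?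
      = if ∃ pos ∈ ps, pos + 1 < N ∧ (pos + 1).toNat = j then some w else init[j]? := by
  induction ps with
  | nil => intro init hj; simp
  | cons p ps ih =>
    intro init hj
    simp only [List.foldl_cons]
    have hlen : (if p + 1 < N then init.set (p + 1).toNat w else init).length = init.length := by
      by_cases h : p + 1 < N <;> simp [h, List.length_set]
    rw [ih _ (by rw [hlen]; exact hj)]
    by_cases hrest : ∃ pos ∈ ps, pos + 1 < N ∧ (pos + 1).toNat = j
    · rw [if_pos hrest,
        if_pos (by rcases hrest with ⟨q, hq, h1, h2⟩; exact ⟨q, List.mem_cons_of_mem _ hq, h1, h2⟩)]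
    · rw [if_neg hrest]
      by_cases hp : p + 1 < N ∧ (p + 1).toNat = j
      · have hx : ∃ pos ∈ p :: ps, pos + 1 < N ∧ (pos + 1).toNat = j :=
          ⟨p, by simp, hp.1, hp.2⟩
        rw [if_pos hx, if_pos hp.1, hp.2, List.getElem?_set_self hj]
      · have hno : ¬ ∃ pos ∈ p :: ps, pos + 1 < N ∧ (pos + 1).toNat = j := by
          rintro ⟨q, hq, h1, h2⟩
          rcases List.mem_cons.mp hq with rfl | hq'
          · exact hp ⟨h1, h2⟩
          · exact hrest ⟨q, hq', h1, h2⟩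
        rw [if_neg hno]
        by_cases h1 : p + 1 < N
        · have h2 : (p + 1).toNat ≠ j := fun hc => hp ⟨h1, hc⟩
          rw [if_pos h1, List.getElem?_set, if_neg h2]
        · rw [if_neg h1]

lemma W2 (N : Int) (entries : List ((Int × Int) × List Int)) (v : Nat → Int) (j : Nat) :
    ∀ (init : List Int), j < init.length →
    (∀ e ∈ entries, ∀ pos ∈ e.2.tail, e.1.2 = v (pos + 1).toNat) →
    (entries.foldl
      (fun labels e =>
        if 2 ≤ e.2.length then
          (PySem.List.slice e.2 (some 1) none).foldl
            (fun lab pos => if pos + 1 < N then lab.set (pos + 1).toNat e.1.2 else lab) labels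
        else labels) init)[j]?
      = if ∃ e ∈ entries, 2 ≤ e.2.length ∧ ∃ pos ∈ e.2.tail, pos + 1 < N ∧ (pos + 1).toNat = j
        then some (v j) else init[j]? := by
  induction entries with
  | nil => intro init hj hv; simp
  | cons e es ih =>
    intro init hj hv
    simp only [List.foldl_cons]
    have hv' : ∀ e' ∈ es, ∀ pos ∈ e'.2.tail, e'.1.2 = v (pos + 1).toNat := fun e' he' =>
      hv e' (List.mem_cons_of_mem _ he')
    have hlen' : (if 2 ≤ e.2.length then
          (PySem.List.slice e.2 (some 1) none).foldl
            (fun lab pos => if pos + 1 < N then lab.set (pos + 1).toNat e.1.2 else lab) init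
        else init).length = init.length := by
      by_cases h : 2 ≤ e.2.length
      · simp only [h, if_true]; rw [W1_len]
      · simp [h]
    rw [ih _ (by rw [hlen']; exact hj) hv']
    have hij : (if 2 ≤ e.2.length then
          (PySem.List.slice e.2 (some 1) none).foldl
            (fun lab pos => if pos + 1 < N then lab.set (pos + 1).toNat e.1.2 else lab) init
        else init)[j]?
        = if 2 ≤ e.2.length ∧ ∃ pos ∈ e.2.tail, pos + 1 < N ∧ (pos + 1).toNat = j
          then some (v j) else init[j]? := by
      by_cases h : 2 ≤ e.2.length
      · rw [if_pos h, PySem.List.slice_from_one, W1 N e.1.2 e.2.tail j init hj]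
        by_cases hex : ∃ pos ∈ e.2.tail, pos + 1 < N ∧ (pos + 1).toNat = j
        · rw [if_pos hex, if_pos ⟨h, hex⟩]
          rcases hex with ⟨pos, hpos, _, htn⟩
          rw [hv e List.mem_cons_self pos hpos, htn]
        · rw [if_neg hex, if_neg (fun hc => hex hc.2)]
      · rw [if_neg h, if_neg (fun hc => h hc.1)]
    rw [hij]
    by_cases hes : ∃ e' ∈ es, 2 ≤ e'.2.length ∧ ∃ pos ∈ e'.2.tail, pos + 1 < N ∧ (pos + 1).toNat = j
    · rw [if_pos hes,
        if_pos (by rcases hes with ⟨e', he', h⟩; exact ⟨e', List.mem_cons_of_mem _ he', h⟩)]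
    · rw [if_neg hes]
      by_cases he : 2 ≤ e.2.length ∧ ∃ pos ∈ e.2.tail, pos + 1 < N ∧ (pos + 1).toNat = j
      · rw [if_pos he, if_pos ⟨e, List.mem_cons_self, he⟩]
      · have hno : ¬ ∃ e' ∈ e :: es, 2 ≤ e'.2.length ∧ ∃ pos ∈ e'.2.tail, pos + 1 < N ∧ (pos + 1).toNat = j := by
          rintro ⟨e', he', h⟩
          rcases List.mem_cons.mp he' with rfl | he''
          · exact he h
          · exact hes ⟨e', he'', h⟩
        rw [if_neg he, if_neg hno]

lemma A_items_val (ids : List Int) (pad : Int) (e : (Int × Int) × List Int)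
    (he : e ∈ (pvDictA ids pad).items) :
    e.2 = (pvPosL ids pad e.1).map (fun k : Nat => (k : Int)) := by
  have hnod := A_nodup_keys ids pad
  have h1 : (pvDictA ids pad).getD e.1 [] = e.2 :=
    PySem.Dict.getD_of_mem_items (pvDictA ids pad) he hnod []
  rw [← h1, A_getD]

lemma A_cond (ids : List Int) (pad : Int) (j : Nat) :
    (∃ e ∈ (pvDictA ids pad).items, 2 ≤ e.2.length ∧
        ∃ pos ∈ e.2.tail, pos + 1 < (ids.length : Int) ∧ (pos + 1).toNat = j)
      ↔ pvRep ids pad (ids.length - 1) j = true := by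
  constructor
  · rintro ⟨e, he, hlen, pos, hpos, hlt, htn⟩
    rw [A_items_val ids pad e he, ← List.map_tail] at hpos
    obtain ⟨i, hi, rfl⟩ := List.mem_map.mp hpos
    obtain ⟨hilt, hQ, y, hy, hQy⟩ := (tail_filter_range _ _ _).mp hi
    simp only [Bool.and_eq_true, beq_iff_eq] at hQ hQy
    have hj : j = i + 1 := by omega
    subst hj
    simp only [pvRep, Bool.and_eq_true, decide_eq_true_eq]
    refine ⟨⟨hilt, hQ.1⟩, ?_⟩
    simp only [pvPrev, List.any_eq_true]
    exact ⟨y, List.mem_range.mpr hy, by simp [hQy.1, hQy.2, hQ.2]⟩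
  · intro hrep
    match j, hrep with
    | i + 1, hrep =>
      simp only [pvRep, Bool.and_eq_true, decide_eq_true_eq] at hrep
      obtain ⟨⟨hi, hocc⟩, hprev⟩ := hrep
      simp only [pvPrev, List.any_eq_true, Bool.and_eq_true, beq_iff_eq] at hprev
      obtain ⟨y, hy, hoccy, hbgy⟩ := hprev
      have hnod := A_nodup_keys ids pad
      have hkeys : pvBg ids i ∈ (pvDictA ids pad).keys :=
        (A_mem_keys ids pad _).mpr ⟨i, hi, hocc, rfl⟩
      obtain ⟨ps, hget⟩ : ∃ ps, (pvDictA ids pad).get? (pvBg ids i) = some ps := by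
        cases h : (pvDictA ids pad).get? (pvBg ids i) with
        | none => exact absurd hkeys ((PySem.Dict.get?_eq_none_iff_not_mem_keys _ _).mp h)
        | some ps => exact ⟨ps, rfl⟩
      have he : (pvBg ids i, ps) ∈ (pvDictA ids pad).items :=
        (PySem.Dict.get?_eq_some_iff_mem_items _ _ _ hnod).mp hget
      have hps : ps = (pvPosL ids pad (pvBg ids i)).map (fun k : Nat => (k : Int)) :=
        A_items_val ids pad (pvBg ids i, ps) he
      have hiTail : i ∈ (pvPosL ids pad (pvBg ids i)).tail := by
        apply (tail_filter_range _ _ _).mpr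
        exact ⟨hi, by simp [hocc], y, List.mem_range.mp hy, by simp [hoccy, hbgy]⟩
      have hpsTail : ((i : Nat) : Int) ∈ ps.tail := by
        rw [hps, ← List.map_tail]
        exact List.mem_map.mpr ⟨i, hiTail, rfl⟩
      have hlen : 2 ≤ ps.length := by
        have h1 : ps.tail ≠ [] := List.ne_nil_of_mem hpsTail
        have h2 : ps.tail.length = ps.length - 1 := List.length_tail
        have h3 : 0 < ps.tail.length := List.length_pos_of_ne_nil h1
        omega
      refine ⟨(pvBg ids i, ps), he, hlen, ((i : Nat) : Int), hpsTail, ?_, ?_⟩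
      · have : i + 1 < ids.length := by omega
        omega
      · omega

lemma A_full (ids : List Int) (pad : Int) :
    (((PySem.List.pyRange 0 ((ids.length : Int) - 1) 1).foldl
        (fun d i =>
          if PySem.List.pyGetD ids i 0 == pad || PySem.List.pyGetD ids (i + 1) 0 == pad then d
          else
            let g := (PySem.List.pyGetD ids i 0, PySem.List.pyGetD ids (i + 1) 0)
            let d' := if d.contains g then d else d.insert g ([] : List Int)
            d'.insert g (d'.getD g [] ++ [i]))
        PySem.Dict.empty).items).foldl
      (fun labels e =>
        if 2 ≤ e.2.length then
          (PySem.List.slice e.2 (some 1) none).foldl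
            (fun lab pos =>
              if pos + 1 < (ids.length : Int) then lab.set (pos + 1).toNat e.1.2 else lab)
            labels
        else labels)
      (List.replicate ids.length (-100))
      = pvTarget ids pad (ids.length - 1) := by
  have hd : (PySem.List.pyRange 0 ((ids.length : Int) - 1) 1).foldl
        (fun d i =>
          if PySem.List.pyGetD ids i 0 == pad || PySem.List.pyGetD ids (i + 1) 0 == pad then d
          else
            let g := (PySem.List.pyGetD ids i 0, PySem.List.pyGetD ids (i + 1) 0)
            let d' := if d.contains g then d else d.insert g ([] : List Int)
            d'.insert g (d'.getD g [] ++ [i]))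
        PySem.Dict.empty = pvDictA ids pad := by
    rcases ids with _ | ⟨x, xs⟩
    · rw [PySem.List.pyRange_one_eq_nil (by norm_num)]
      rfl
    · have hn : ((((x :: xs).length : Nat) : Int) - 1) = (((x :: xs).length - 1 : Nat) : Int) := by
        simp [List.length_cons]
      rw [hn, PySem.List.pyRange_zero_natCast]
      exact A_phase1 (x :: xs) pad ((x :: xs).length - 1) PySem.Dict.empty
  rw [hd]
  apply List.ext_getElem?
  intro j
  by_cases hj : j < ids.length
  · rw [W2 (ids.length : Int) (pvDictA ids pad).items (fun j => ids.getD j 0) j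
        (List.replicate ids.length (-100)) (by simpa using hj)
        (fun e he pos hpos => by
          rw [A_items_val ids pad e he, ← List.map_tail] at hpos
          obtain ⟨i, hi, rfl⟩ := List.mem_map.mp hpos
          have hi' := List.mem_of_mem_tail hi
          have hm := List.mem_filter.mp hi'
          simp only [Bool.and_eq_true, beq_iff_eq] at hm
          have htn : (((i : Nat) : Int) + 1).toNat = i + 1 := by omega
          rw [← hm.2.2, htn]
          rfl)]
    have htj : (pvTarget ids pad (ids.length - 1))[j]?
        = some (if pvRep ids pad (ids.length - 1) j then ids.getD j 0 else -100) := by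
      unfold pvTarget
      rw [List.getElem?_map, List.getElem?_range hj]
      rfl
    rw [htj, List.getElem?_replicate]
    by_cases hc : pvRep ids pad (ids.length - 1) j = true
    · rw [if_pos ((A_cond ids pad j).mpr hc), if_pos hc]
    · rw [if_neg (fun h => hc ((A_cond ids pad j).mp h)), if_neg hc, if_pos hj]
  · have h1 : ((pvDictA ids pad).items.foldl
        (fun labels e =>
          if 2 ≤ e.2.length then
            (PySem.List.slice e.2 (some 1) none).foldl
              (fun lab pos =>
                if pos + 1 < (ids.length : Int) then lab.set (pos + 1).toNat e.1.2 else lab)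
              labels
          else labels)
        (List.replicate ids.length (-100))).length = ids.length := by
      rw [W2_len]; simp
    have h2 : (pvTarget ids pad (ids.length - 1)).length = ids.length := by
      simp [pvTarget]
    rw [List.getElem?_eq_none (by omega), List.getElem?_eq_none (by omega)]

lemma A_eq_target (ids : List Int) (pad : Int) :
    label_repeating_bigrams ids pad = pvTarget ids pad (ids.length - 1) := by
  unfold label_repeating_bigrams
  exact A_full ids pad


-- ===== VERDICT (by name: the statement is the Claim_ definition above) =====
theorem label_repeating_bigrams_spec : Claim_equal_label_repeating_bigrams := by
  intro ids pad _
  unfold Spec_label_repeating_bigrams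
  rw [A_eq_target, B_eq_target]
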